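-- pv_equiv track=rewrite | github.com/52Sides/okved_game | script.py | rebuild_okved
-- ===== SOURCE A (Python) =====
-- def rebuild_okved(digits: str) -> str:
--     """
--     Restore OKVED code formatting by inserting dots
--
--     Example: 01111 -> 01.11.1
--     """
--     if len(digits) <= 2:
--         return digits
--
--     parts = []
--     i = 0
--
--     while i < len(digits):
--         if len(digits) - i <= 2:
--             parts.append(digits[i:])
--             break
--
--         parts.append(digits[i:i + 2])
--         i += 2
--
--     return ".".join(parts)
-- ===== SOURCE B (Python) =====
-- def rebuild_okved(digits: str) -> str:
--     out = []
--     for i, ch in enumerate(digits):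
--         if i >= 2 and i % 2 == 0:
--             out.append('.')
--         out.append(ch)
--     return "".join(out)
-- ===== Notes on version B (the rewrite author's own statement) =====
-- stated objective: alternative
-- what changed: Instead of cutting the string into two-character slices and joining the chunk list with a dot separator, B makes a single per-character pass that emits a dot before every character whose even index is at least 2, so no slices, no chunk list and no special cases for short strings or the tail exist; avoiding the per-chunk slice objects is a constant-factor saving.
import Mathlib
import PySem

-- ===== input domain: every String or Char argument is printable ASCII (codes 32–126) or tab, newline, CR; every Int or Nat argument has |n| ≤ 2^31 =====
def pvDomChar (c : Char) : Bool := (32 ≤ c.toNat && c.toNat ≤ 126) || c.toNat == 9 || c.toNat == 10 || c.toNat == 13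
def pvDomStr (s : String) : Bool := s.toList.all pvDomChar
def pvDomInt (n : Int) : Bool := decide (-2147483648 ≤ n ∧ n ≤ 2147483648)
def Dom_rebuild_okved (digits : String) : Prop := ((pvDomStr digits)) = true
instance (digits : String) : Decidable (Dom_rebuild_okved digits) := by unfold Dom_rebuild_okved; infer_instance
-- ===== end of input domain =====

-- B replaces A's slicing into two-character chunks joined with '.' by a single per-character
-- pass that emits a dot before every character at an even index ≥ 2 (no slices, no chunk list).

-- ===== PORT A =====
-- the while-loop of A: parts are returned (cons ↔ append), `break` ↔ stopping the recursion
def rebuild_okved_loop (digits : String) (i : Int) : List String :=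
  if _h : i < PySem.Str.len digits then
    if PySem.Str.len digits - i ≤ 2 then
      [PySem.Str.slice digits (some i) none]
    else
      PySem.Str.slice digits (some i) (some (i + 2)) :: rebuild_okved_loop digits (i + 2)
  else []
termination_by (PySem.Str.len digits - i).toNat
decreasing_by omega

def rebuild_okved (digits : String) : String :=
  if PySem.Str.len digits ≤ 2 then digits
  else PySem.Str.join "." (rebuild_okved_loop digits 0)

-- ===== PORT B =====
-- 'for i, ch in enumerate(digits): if i >= 2 and i % 2 == 0: out.append('.'); out.append(ch)'
def rebuild_okved_alt (digits : String) : String :=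
  PySem.Str.join ""
    ((PySem.List.enumerate digits.toList 0).foldl
      (fun out p =>
        (if 2 ≤ p.1 ∧ PySem.Int.mod p.1 2 = 0 then out ++ ["."] else out)
          ++ [String.ofList [p.2]])
      [])

-- ===== PRECONDITION & SPEC =====
def Spec_rebuild_okved (digits : String) (out : String) : Prop := out = rebuild_okved_alt digits
instance (digits : String) (out : String) : Decidable (Spec_rebuild_okved digits out) := by unfold Spec_rebuild_okved; infer_instance

-- ===== CLAIM (what is proved, stated in full; the proofs are below) =====
def Claim_equal_rebuild_okved : Prop := ∀ (digits : String), Dom_rebuild_okved digits → Spec_rebuild_okved digits (rebuild_okved digits)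

-- ===== LEMMAS AND PROOFS =====

-- canonical chunking of A: slices of two, last chunk of one or two characters
def chunks (l : List Char) : List (List Char) :=
  if l.length ≤ 2 then [l] else l.take 2 :: chunks (l.drop 2)
termination_by l.length
decreasing_by simp only [List.length_drop]; omega

-- the char-level step of B
def gc (p : Int × Char) : List Char :=
  (if 2 ≤ p.1 ∧ PySem.Int.mod p.1 2 = 0 then ['.'] else []) ++ [p.2]

lemma mod2 (s : Int) : PySem.Int.mod s 2 = s % 2 := by
  unfold PySem.Int.mod
  rw [Int.fmod_eq_emod]
  simp

lemma chunks_ne_nil (l : List Char) : chunks l ≠ [] := by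
  rw [chunks]; split <;> simp

-- A's loop produces exactly the chunks of the remaining suffix
lemma loop_eq_chunks (digits : String) (i : Int) :
    0 ≤ i → i < PySem.Str.len digits →
    (rebuild_okved_loop digits i).map String.toList = chunks (digits.toList.drop i.toNat) := by
  induction i using rebuild_okved_loop.induct digits with
  | case1 i hlt' hle =>
    intro h0 _
    rw [rebuild_okved_loop, dif_pos hlt', if_pos hle, chunks]
    have hL := PySem.Str.len_eq digits
    rw [if_pos (by simp only [List.length_drop]; omega)]
    simp [PySem.Str.toList_slice, PySem.Chars.slice_eq_listSlice,
          PySem.List.slice_from _ h0]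
  | case2 i hlt' hle ih =>
    intro h0 _
    have hL := PySem.Str.len_eq digits
    rw [rebuild_okved_loop, dif_pos hlt', if_neg hle, chunks,
        if_neg (by simp only [List.length_drop]; omega)]
    simp only [List.map_cons]
    rw [ih (by omega) (by omega)]
    congr 1
    · rw [PySem.Str.toList_slice, PySem.Chars.slice_eq_listSlice,
          PySem.List.slice_toNat _ h0 (by omega)]
      congr 1
      omega
    · have h2 : (i + 2).toNat = i.toNat + 2 := by omega
      rw [List.drop_drop, h2]
  | case3 i hlt' =>
    intro _ hlt
    exact absurd hlt hlt'

-- shifting the enumeration start by two does not change B's output as long as 1 ≤ s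
lemma flatMap_gc_shift (r : List Char) (s : Int) (hs : 1 ≤ s) :
    (PySem.List.enumerate r (s + 2)).flatMap gc = (PySem.List.enumerate r s).flatMap gc := by
  induction r generalizing s with
  | nil => simp [PySem.List.enumerate_nil]
  | cons x xs ih =>
    rw [PySem.List.enumerate_cons, PySem.List.enumerate_cons,
        List.flatMap_cons, List.flatMap_cons]
    have hg : gc (s + 2, x) = gc (s, x) := by
      unfold gc
      rw [if_congr (show (2 ≤ s + 2 ∧ PySem.Int.mod (s + 2) 2 = 0)
            ↔ (2 ≤ s ∧ PySem.Int.mod s 2 = 0) from by simp only [mod2]; omega) rfl rfl]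
    rw [hg]
    congr 1
    have harith : s + 2 + 1 = s + 1 + 2 := by ring
    rw [harith, ih (s + 1) (by omega)]

-- B's per-character pass equals A's chunk-join, at the char-list level
lemma flatMap_gc_eq_join_chunks (l : List Char) :
    (PySem.List.enumerate l 0).flatMap gc = PySem.Chars.join ['.'] (chunks l) := by
  induction l using chunks.induct with
  | case1 l hle =>
    rw [chunks, if_pos hle, PySem.Chars.join_singleton]
    match l, hle with
    | [], _ => simp [PySem.List.enumerate_nil]
    | [a], _ =>
      simp only [PySem.List.enumerate_cons, PySem.List.enumerate_nil,
        List.flatMap_cons, List.flatMap_nil, List.append_nil]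
      rw [gc, if_neg (by rw [mod2]; omega)]
      rfl
    | [a, b], _ =>
      simp only [PySem.List.enumerate_cons, PySem.List.enumerate_nil,
        List.flatMap_cons, List.flatMap_nil, List.append_nil]
      rw [gc, gc, if_neg (by rw [mod2]; omega), if_neg (by rw [mod2]; omega)]
      rfl
    | _ :: _ :: _ :: _, hle => simp at hle
  | case2 l hle ih =>
    match l, hle with
    | [], hle => simp at hle
    | [_], hle => simp at hle
    | [_, _], hle => simp at hle
    | a :: b :: c :: t, hle =>
      rw [chunks, if_neg hle]
      obtain ⟨d, ds, hds⟩ : ∃ d ds, chunks (List.drop 2 (a :: b :: c :: t)) = d :: ds := by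
        cases h : chunks (List.drop 2 (a :: b :: c :: t)) with
        | nil => exact absurd h (chunks_ne_nil _)
        | cons d ds => exact ⟨d, ds, rfl⟩
      rw [hds, PySem.Chars.join_cons_cons, ← hds, ← ih]
      have ha : gc (0, a) = [a] := by norm_num [gc, mod2]
      have hb : gc ((0 : Int) + 1, b) = [b] := by norm_num [gc, mod2]
      have hc : gc ((0 : Int) + 1 + 1, c) = ['.', c] := by norm_num [gc, mod2]
      have hc0 : gc (0, c) = [c] := by norm_num [gc, mod2]
      simp only [PySem.List.enumerate_cons, List.flatMap_cons]
      rw [ha, hb, hc, show (0 : Int) + 1 + 1 + 1 = 1 + 2 from by ring,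
          flatMap_gc_shift t 1 le_rfl]
      simp only [List.drop, PySem.List.enumerate_cons, List.flatMap_cons]
      rw [hc0, show (0 : Int) + 1 = 1 from by ring]
      simp

-- joining with the empty separator is flattening
lemma join_nil_sep (xss : List (List Char)) : PySem.Chars.join [] xss = xss.flatten := by
  induction xss with
  | nil => simp [PySem.Chars.join_nil]
  | cons p ps ih =>
    cases ps with
    | nil => simp [PySem.Chars.join_singleton]
    | cons q rest => rw [PySem.Chars.join_cons_cons, ih]; simp

-- B's fold, rewritten as a flatMap of the char-level step
lemma alt_toList (digits : String) :
    (rebuild_okved_alt digits).toList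
      = (PySem.List.enumerate digits.toList 0).flatMap gc := by
  unfold rebuild_okved_alt
  have hstep : (fun (out : List String) (p : Int × Char) =>
      (if 2 ≤ p.1 ∧ PySem.Int.mod p.1 2 = 0 then out ++ ["."] else out) ++ [String.ofList [p.2]])
      = fun out p =>
        out ++ ((if 2 ≤ p.1 ∧ PySem.Int.mod p.1 2 = 0 then ["."] else []) ++ [String.ofList [p.2]]) := by
    funext out p
    split <;> simp
  rw [hstep, PySem.List.foldl_append_eq_flatMap, List.nil_append,
      PySem.Str.toList_join, show ("" : String).toList = [] from rfl, join_nil_sep]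
  induction (PySem.List.enumerate digits.toList 0) with
  | nil => simp
  | cons p ps ih =>
    simp only [List.flatMap_cons, List.map_append, List.flatten_append, ih, gc]
    congr 1
    split <;> simp

-- ===== VERDICT (by name: the statement is the Claim_ definition above) =====
theorem rebuild_okved_spec : Claim_equal_rebuild_okved := by
  intro digits _
  unfold Spec_rebuild_okved
  have hL := PySem.Str.len_eq digits
  apply String.toList_inj.mp
  rw [alt_toList, flatMap_gc_eq_join_chunks]
  unfold rebuild_okved
  by_cases hlen : PySem.Str.len digits ≤ 2
  · rw [if_pos hlen, chunks, if_pos (by omega), PySem.Chars.join_singleton]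
  · rw [if_neg hlen, PySem.Str.toList_join,
        loop_eq_chunks digits 0 le_rfl (by omega)]
    simp
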